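-- pv_equiv track=rewrite | github.com/EvgeniyBudaev/python-algorithms | tasks/task13/task13.py | zero_dists
-- ===== SOURCE A (Python) =====
-- def zero_dists(start, seq):
--     """Дистанция до 0"""
--     value = '0'
--     d = start
--     for n in seq:
--         if n == value:
--             d = 0
--         else:
--             d += 1
--         yield d
-- ===== SOURCE B (Python) =====
-- def zero_dists(start, seq):
--     """Distance since last '0': segment decomposition.
--     Find consecutive '0' positions and emit each zero-free run as one
--     arithmetic range, instead of a per-element reset/increment recurrence."""
--     xs = list(seq)
--     out = []
--     lo, base = 0, start
--     while True:
--         try: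
--             z = xs.index('0', lo)
--         except ValueError:
--             out.extend(range(base + 1, base + 1 + len(xs) - lo))
--             return out
--         out.extend(range(base + 1, base + 1 + z - lo))
--         out.append(0)
--         lo, base = z + 1, 0
-- ===== Notes on version B (the rewrite author's own statement) =====
-- stated objective: alternative
-- what changed: Instead of a per-element reset-or-increment recurrence, B locates the '0' positions with list.index and emits each zero-free run as one closed-form arithmetic range (plus a 0 at each zero), iterating over segments rather than elements.
import Mathlib
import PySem

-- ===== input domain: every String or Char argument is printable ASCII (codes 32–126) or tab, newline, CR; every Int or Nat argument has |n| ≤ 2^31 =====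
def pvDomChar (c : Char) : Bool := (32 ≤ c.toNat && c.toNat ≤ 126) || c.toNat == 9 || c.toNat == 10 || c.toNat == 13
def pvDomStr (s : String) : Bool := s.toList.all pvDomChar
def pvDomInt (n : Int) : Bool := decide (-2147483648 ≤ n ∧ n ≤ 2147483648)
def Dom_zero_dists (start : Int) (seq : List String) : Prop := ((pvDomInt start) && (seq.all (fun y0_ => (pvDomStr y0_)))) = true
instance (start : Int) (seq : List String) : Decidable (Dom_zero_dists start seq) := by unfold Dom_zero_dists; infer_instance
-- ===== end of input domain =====

-- B replaces A's per-element reset/increment recurrence by a segment decomposition: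
-- it finds the '0' positions and emits each zero-free run as one arithmetic range (objective: alternative).


-- ===== PORT A =====
-- literal port of A: loop over seq carrying d, yielding each updated d
def zeroDistsLoop (d : Int) (seq : List String) : List Int :=
  match seq with
  | [] => []
  | n :: rest =>
      let d' := if n = "0" then 0 else d + 1
      d' :: zeroDistsLoop d' rest

def zero_dists (start : Int) (seq : List String) : List Int :=
  zeroDistsLoop start seq

-- ===== PORT B =====
-- port of B's while loop: recursion over the suffix after the last '0' found
-- (Python's lo index becomes the dropped prefix), one pyRange per zero-free run
def zdSegs (base : Int) (xs : List String) : List Int :=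
  match h : PySem.List.index? xs "0" with
  | none => PySem.List.pyRange (base + 1) (base + 1 + xs.length) 1
  | some z =>
      PySem.List.pyRange (base + 1) (base + 1 + z) 1 ++ [0] ++ zdSegs 0 (xs.drop (z + 1))
termination_by xs.length
decreasing_by
  obtain ⟨hk, -⟩ := PySem.List.getElem_of_index?_eq_some h
  simp only [List.length_drop]; omega

def zero_dists_alt (start : Int) (seq : List String) : List Int :=
  zdSegs start seq

-- ===== PRECONDITION & SPEC =====
def Spec_zero_dists (start : Int) (seq : List String) (out : List Int) : Prop := out = zero_dists_alt start seq
instance (start : Int) (seq : List String) (out : List Int) : Decidable (Spec_zero_dists start seq out) := by unfold Spec_zero_dists; infer_instance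

-- ===== CLAIM =====
def Claim_equal_zero_dists : Prop := ∀ (start : Int) (seq : List String), Dom_zero_dists start seq → Spec_zero_dists start seq (zero_dists start seq)

-- ===== LEMMAS AND PROOFS =====
-- equation lemmas for zdSegs
theorem zdSegs_none (base : Int) (xs : List String)
    (h : PySem.List.index? xs "0" = none) :
    zdSegs base xs = PySem.List.pyRange (base + 1) (base + 1 + xs.length) 1 := by
  rw [zdSegs]
  rw [PySem.List.index?_eq_idxOf?] at h
  split
  · rfl
  · rename_i z heq
    rw [PySem.List.index?_eq_idxOf?] at heq
    rw [heq] at h; cases h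

theorem zdSegs_some (base : Int) (xs : List String) (z : Nat)
    (h : PySem.List.index? xs "0" = some z) :
    zdSegs base xs =
      PySem.List.pyRange (base + 1) (base + 1 + z) 1 ++ [0] ++ zdSegs 0 (xs.drop (z + 1)) := by
  rw [zdSegs]
  rw [PySem.List.index?_eq_idxOf?] at h
  split
  · rename_i heq
    rw [PySem.List.index?_eq_idxOf?] at heq
    rw [heq] at h; cases h
  · rename_i z' heq
    rw [PySem.List.index?_eq_idxOf?] at heq
    rw [heq] at h
    injection h with hz
    subst hz
    rfl

-- A's loop over a zero-free prefix is one arithmetic range, ending in state d + pre.length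
theorem loop_nozero (pre : List String) (hp : "0" ∉ pre) :
    ∀ (d : Int) (l : List String),
      zeroDistsLoop d (pre ++ l) =
        PySem.List.pyRange (d + 1) (d + 1 + pre.length) 1 ++ zeroDistsLoop (d + pre.length) l := by
  induction pre with
  | nil =>
      intro d l
      simp [PySem.List.pyRange_one_eq_nil (le_refl (d + 1))]
  | cons n rest ih =>
      intro d l
      have hn : n ≠ "0" := fun hEq => hp (by simp [hEq])
      have hr : "0" ∉ rest := fun hm => hp (List.mem_cons_of_mem _ hm)
      rw [List.cons_append]
      show (if n = "0" then 0 else d + 1) :: zeroDistsLoop (if n = "0" then 0 else d + 1) (rest ++ l) = _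
      rw [if_neg hn, ih hr (d + 1) l]
      simp only [List.length_cons, Nat.cast_add, Nat.cast_one]
      rw [PySem.List.pyRange_one_cons (by omega : d + 1 < d + 1 + ((rest.length : Int) + 1))]
      rw [show d + 1 + ((rest.length : Int) + 1) = d + 1 + 1 + rest.length by ring,
          show d + ((rest.length : Int) + 1) = d + 1 + rest.length by ring]
      rfl

theorem loop_eq_segs : ∀ (xs : List String) (d : Int), zeroDistsLoop d xs = zdSegs d xs := by
  intro xs
  generalize hL : xs.length = n
  induction n using Nat.strong_induction_on generalizing xs with
  | _ n ih =>
    intro d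
    cases hidx : PySem.List.index? xs "0" with
    | none =>
        have hmem : "0" ∉ xs := (PySem.List.index?_eq_none_iff xs "0").mp hidx
        rw [zdSegs_none _ _ hidx]
        have h := loop_nozero xs hmem d []
        simpa [zeroDistsLoop, hL] using h
    | some z =>
        obtain ⟨pre, suf, hxs, hlen, hpre⟩ := (PySem.List.index?_eq_some_iff xs "0" z).mp hidx
        rw [zdSegs_some _ _ _ hidx]
        have hdrop : xs.drop (z + 1) = suf := by
          subst hxs; subst hlen
          rw [show pre ++ "0" :: suf = (pre ++ ["0"]) ++ suf by simp,
              show pre.length + 1 = (pre ++ ["0"]).length by simp]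
          exact List.drop_left
        have hsuf : suf.length < n := by
          subst hxs; subst hlen; simp at hL; omega
        have h1 := loop_nozero pre hpre d ("0" :: suf)
        have h2 : zeroDistsLoop (d + pre.length) ("0" :: suf) = 0 :: zeroDistsLoop 0 suf := by
          show (if ("0":String) = "0" then 0 else d + (pre.length:Int) + 1) :: _ = _
          rw [if_pos rfl]
        rw [hdrop, hxs, h1, h2, ← ih suf.length hsuf suf rfl 0, hlen]
        simp [List.append_assoc]

-- ===== VERDICT =====
theorem zero_dists_spec : Claim_equal_zero_dists := by
  intro start seq _
  unfold Spec_zero_dists zero_dists zero_dists_alt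
  exact loop_eq_segs seq start
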